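-- pv_equiv track=rewrite | github.com/ZiadElsisi/CPU_Scheduler_Project | gant_wiget.py | build_gantt
-- ===== SOURCE A (Python) =====
-- def build_gantt(timeline):
--     gantt = []
--
--     if not timeline:
--         return gantt
--
--     current_id = timeline[0][1]
--     start_time = timeline[0][0]
--
--     for i in range(1, len(timeline)):
--         time, pid = timeline[i]
--
--         if pid != current_id:
--             gantt.append({
--                 "id": current_id,
--                 "start": start_time,
--                 "end": time
--             })
--
--             current_id = pid
--             start_time = time
--
--     # close last block
--     gantt.append({
--         "id": current_id,
--         "start": start_time,
--         "end": timeline[-1][0] + 1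
--     })
--
--     return gantt
-- ===== SOURCE B (Python) =====
-- def build_gantt(timeline):
--     if not timeline:
--         return []
--     last_end = timeline[-1][0] + 1
--
--     def blocks(tl):
--         pid = tl[0][1]
--         rest = tl[1:]
--         while rest and rest[0][1] == pid:
--             rest = rest[1:]
--         end = rest[0][0] if rest else last_end
--         head = {"id": pid, "start": tl[0][0], "end": end}
--         return [head] + (blocks(rest) if rest else [])
--
--     return blocks(timeline)
-- ===== Notes on version B (the rewrite author's own statement) =====
-- stated objective: alternative
-- what changed: Replaces A's single stateful loop with mutable current_id/start_time accumulators by a recursive group-splitting decomposition: each call peels one maximal run of equal pids off the front, emits its block (ended by the next run's first time, or by last time + 1 for the final run), and recurses on the remainder.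
import Mathlib
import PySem

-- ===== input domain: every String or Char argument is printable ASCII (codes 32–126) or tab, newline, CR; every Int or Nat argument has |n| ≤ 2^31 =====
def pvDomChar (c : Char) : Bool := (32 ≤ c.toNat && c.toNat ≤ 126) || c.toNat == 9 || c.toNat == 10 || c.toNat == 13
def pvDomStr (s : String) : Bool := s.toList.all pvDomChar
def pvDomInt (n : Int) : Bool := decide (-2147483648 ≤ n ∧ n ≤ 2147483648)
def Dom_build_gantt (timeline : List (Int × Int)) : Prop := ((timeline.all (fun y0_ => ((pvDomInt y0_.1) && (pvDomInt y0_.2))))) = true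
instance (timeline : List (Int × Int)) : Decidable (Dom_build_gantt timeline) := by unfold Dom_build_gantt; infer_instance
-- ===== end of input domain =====

-- B replaces A's stateful loop by recursive group-splitting (peel one maximal run of equal pids,
-- emit its block, recurse); same return value, objective: alternative decomposition.

-- ===== PORT A =====
-- A's loop "for i in range(1, len)" reads timeline[i] for the elements after the first;
-- it is ported as a fold over the tail with state (gantt, current_id, start_time).
def pvStepA (st : List (List (String × Int)) × Int × Int) (tp : Int × Int) :
    List (List (String × Int)) × Int × Int :=
  let (g, cid, stt) := st
  let (time, pid) := tp
  if pid ≠ cid then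
    (g ++ [[("id", cid), ("start", stt), ("end", time)]], pid, time)
  else st

def build_gantt (timeline : List (Int × Int)) : List (List (String × Int)) :=
  match timeline with
  | [] => []
  | (t0, p0) :: rest =>
    let s := rest.foldl pvStepA ([], p0, t0)
    -- timeline[-1][0] + 1: last element of the (nonempty) list
    s.1 ++ [[("id", s.2.1), ("start", s.2.2),
             ("end", (((t0, p0) :: rest).getLast (List.cons_ne_nil _ _)).1 + 1)]]

-- ===== PORT B =====
-- Source B's inner `blocks`: the while loop "while rest and rest[0][1] == pid: rest = rest[1:]"
-- is exactly List.dropWhile on the tail; recursion on the remaining suffix.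
def pvBlocks (lastEnd : Int) : List (Int × Int) → List (List (String × Int))
  | [] => []
  | (t, p) :: rest =>
    let tail := rest.dropWhile (fun x => x.2 == p)
    let e : Int := match tail with
      | [] => lastEnd
      | (t', _) :: _ => t'
    [("id", p), ("start", t), ("end", e)] :: pvBlocks lastEnd tail
termination_by tl => tl.length
decreasing_by
  simp only [List.length_cons]
  exact Nat.lt_succ_of_le (List.length_dropWhile_le _ _)

def build_gantt_alt (timeline : List (Int × Int)) : List (List (String × Int)) :=
  match timeline with
  | [] => []
  | (t0, p0) :: rest =>
    pvBlocks ((((t0, p0) :: rest).getLast (List.cons_ne_nil _ _)).1 + 1) ((t0, p0) :: rest)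

-- ===== PRECONDITION & SPEC =====
def Spec_build_gantt (timeline : List (Int × Int)) (out : List (List (String × Int))) : Prop := out = build_gantt_alt timeline
instance (timeline : List (Int × Int)) (out : List (List (String × Int))) : Decidable (Spec_build_gantt timeline out) := by unfold Spec_build_gantt; infer_instance

-- ===== CLAIM (what is proved, stated in full; the proofs are below) =====
def Claim_equal_build_gantt : Prop := ∀ (timeline : List (Int × Int)), Dom_build_gantt timeline → Spec_build_gantt timeline (build_gantt timeline)

-- ===== LEMMAS AND PROOFS =====

-- Main invariant: A's fold from state (g, cid, st), closed with final end `lastEnd`,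
-- equals g followed by the block for the current run and B's blocks of the remaining suffix.
theorem pv_main (rest : List (Int × Int)) :
    ∀ (g : List (List (String × Int))) (cid st lastEnd : Int),
    (let s := rest.foldl pvStepA (g, cid, st)
     s.1 ++ [[("id", s.2.1), ("start", s.2.2), ("end", lastEnd)]])
    = g ++ ([("id", cid), ("start", st),
             ("end", match rest.dropWhile (fun x => x.2 == cid) with
                     | [] => lastEnd
                     | (t', _) :: _ => t')] ::
            pvBlocks lastEnd (rest.dropWhile (fun x => x.2 == cid))) := by
  induction rest with
  | nil => intro g cid st lastEnd; simp [pvBlocks]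
  | cons hd tl ih =>
    intro g cid st lastEnd
    obtain ⟨t, p⟩ := hd
    by_cases h : p = cid
    · subst h
      simp only [List.foldl_cons, pvStepA]
      rw [if_neg (show ¬(p ≠ p) by simp)]
      rw [show List.dropWhile (fun x => x.2 == p) ((t, p) :: tl)
            = List.dropWhile (fun x => x.2 == p) tl from by
        simp]
      exact ih g p st lastEnd
    · simp only [List.foldl_cons, pvStepA]
      rw [if_pos h]
      rw [show List.dropWhile (fun x => x.2 == cid) ((t, p) :: tl)
            = (t, p) :: tl from by
        simp [h]]
      rw [ih (g ++ [[("id", cid), ("start", st), ("end", t)]]) p t lastEnd]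
      conv_rhs => rw [pvBlocks.eq_def]
      simp

-- ===== VERDICT (by name: the statement is the Claim_ definition above) =====
theorem build_gantt_spec : Claim_equal_build_gantt := by
  intro timeline _
  unfold Spec_build_gantt
  match timeline with
  | [] => rfl
  | (t0, p0) :: rest =>
    show (let s := rest.foldl pvStepA ([], p0, t0); _) = _
    rw [build_gantt_alt, pvBlocks]
    exact pv_main rest [] p0 t0 _
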